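-- pv_equiv track=rewrite | github.com/sid-in-the-loop/t3-testbed | general_agent/webwalkerqa/methods/t3_fixed.py | _append_queries_to_state
-- ===== SOURCE A (Python) =====
-- def _append_queries_to_state(state: str, new_queries: str) -> str:
--     """Append new queries to Queries Tried line in state (fallback when extraction fails)."""
--     if "Queries Tried:" in state:
--         lines = state.split("\n")
--         for i, line in enumerate(lines):
--             if "Queries Tried:" in line:
--                 if "None" in line:
--                     lines[i] = f"- Queries Tried: {new_queries}"
--                 else:
--                     lines[i] = line.rstrip() + f", {new_queries}"
--                 break
--         return "\n".join(lines)
--     return state + f"\n- Queries Tried (appended): {new_queries}"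
-- ===== SOURCE B (Python) =====
-- def _append_queries_to_state(state: str, new_queries: str) -> str:
--     """Append new queries to Queries Tried line in state (fallback when extraction fails)."""
--     if "Queries Tried:" not in state:
--         return state + f"\n- Queries Tried (appended): {new_queries}"
--     parts = []
--     s = state
--     while True:
--         head, sep, tail = s.partition("\n")
--         if sep and "Queries Tried:" not in head:
--             parts.append(head)
--             s = tail
--             continue
--         if "None" in head:
--             edited = f"- Queries Tried: {new_queries}"
--         else:
--             edited = head.rstrip() + f", {new_queries}"
--         parts.append(edited + sep + tail)
--         return "\n".join(parts)
-- ===== Notes on version B (the rewrite author's own statement) =====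
-- stated objective: alternative
-- what changed: B never builds the list of all lines: it peels lines off the raw string one at a time with str.partition, stops at the first line containing the marker (or the final line), edits that line and keeps the untouched remainder of the string as-is, instead of A's split-into-list / indexed loop with mutation and break / re-join of every line.
import Mathlib
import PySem

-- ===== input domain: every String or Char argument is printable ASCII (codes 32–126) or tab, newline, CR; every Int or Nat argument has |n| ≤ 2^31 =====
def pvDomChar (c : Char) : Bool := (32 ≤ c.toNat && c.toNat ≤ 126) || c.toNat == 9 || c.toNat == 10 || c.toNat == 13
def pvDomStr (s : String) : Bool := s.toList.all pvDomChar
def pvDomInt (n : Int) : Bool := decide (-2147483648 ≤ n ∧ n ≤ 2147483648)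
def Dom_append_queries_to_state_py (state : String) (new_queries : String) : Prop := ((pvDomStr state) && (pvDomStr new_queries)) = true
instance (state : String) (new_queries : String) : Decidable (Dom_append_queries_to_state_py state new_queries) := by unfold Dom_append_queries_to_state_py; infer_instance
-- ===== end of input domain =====

-- B rewrites A without building the list of all lines: it peels lines off the raw string until the
-- first line containing "Queries Tried:" (or the final line), edits it, and keeps the rest verbatim.

-- shared helper: the edited replacement line (the identical two Python lines occur in A and in B)
def pvEdit (nq l : List Char) : List Char :=
  if PySem.Chars.isIn "None".toList l
  then "- Queries Tried: ".toList ++ nq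
  else PySem.Chars.rstrip l ++ ", ".toList ++ nq

-- ===== PORT A =====
-- the for/enumerate/break loop over the split lines: replace the first matching line, keep the rest
def pvALoop (nq : List Char) : List (List Char) → List (List Char)
  | [] => []
  | l :: ls =>
    if PySem.Chars.isIn "Queries Tried:".toList l
    then pvEdit nq l :: ls
    else l :: pvALoop nq ls

def append_queries_to_state_py (state : String) (new_queries : String) : String :=
  if PySem.Chars.isIn "Queries Tried:".toList state.toList then
    String.ofList (PySem.Chars.join "\n".toList
      (pvALoop new_queries.toList (PySem.Chars.splitOn state.toList "\n".toList)))
  else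
    String.ofList (state.toList ++ "\n- Queries Tried (appended): ".toList ++ new_queries.toList)

-- ===== PORT B =====
-- "not a newline" (str.partition("\n") is ported by hand, exact for this one-character separator:
-- head = takeWhile pvNl, and sep is "" iff dropWhile pvNl is [])
def pvNl (c : Char) : Bool := c != '\n'

-- the while-loop of Source B: `parts` is the accumulator list, joined on return
def pvBGo (nq : List Char) (parts : List (List Char)) (s : List Char) : List Char :=
  match h : s.dropWhile pvNl with
  | [] => PySem.Chars.join "\n".toList (parts ++ [pvEdit nq s])
  | _ :: tail =>
    let head := s.takeWhile pvNl
    if PySem.Chars.isIn "Queries Tried:".toList head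
    then PySem.Chars.join "\n".toList (parts ++ [pvEdit nq head ++ '\n' :: tail])
    else pvBGo nq (parts ++ [head]) tail
termination_by s.length
decreasing_by
  have := List.length_dropWhile_le pvNl s
  rw [h] at this
  simp at this ⊢
  omega

def append_queries_to_state_py_alt (state : String) (new_queries : String) : String :=
  if PySem.Chars.isIn "Queries Tried:".toList state.toList then
    String.ofList (pvBGo new_queries.toList [] state.toList)
  else
    String.ofList (state.toList ++ "\n- Queries Tried (appended): ".toList ++ new_queries.toList)

-- ===== PRECONDITION & SPEC =====
def Spec_append_queries_to_state_py (state : String) (new_queries : String) (out : String) : Prop := out = append_queries_to_state_py_alt state new_queries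
instance (state : String) (new_queries : String) (out : String) : Decidable (Spec_append_queries_to_state_py state new_queries out) := by unfold Spec_append_queries_to_state_py; infer_instance

-- ===== CLAIM (what is proved, stated in full; the proofs are below) =====
def Claim_equal_append_queries_to_state_py : Prop := ∀ (state : String) (new_queries : String), Dom_append_queries_to_state_py state new_queries → Spec_append_queries_to_state_py state new_queries (append_queries_to_state_py state new_queries)

-- ===== LEMMAS AND PROOFS =====

-- reference split on '\n' (proof helper): structural recursion over the characters
def splitNl : List Char → List (List Char)
  | [] => [[]]
  | c :: rest =>
    if c = '\n' then [] :: splitNl rest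
    else
      match splitNl rest with
      | h :: t => (c :: h) :: t
      | [] => [[c]]

lemma splitNl_ne_nil (l : List Char) : splitNl l ≠ [] := by
  cases l with
  | nil => simp [splitNl]
  | cons c rest =>
    simp only [splitNl]
    split
    · simp
    · split <;> simp

lemma modifyHead_id (l : List (List Char)) : l.modifyHead (fun x => x) = l := by
  cases l <;> simp

lemma splitOn_go_eq (fuel : Nat) : ∀ (l cur : List Char) (acc : List (List Char)),
    l.length ≤ fuel →
    PySem.Chars.splitOn.go "\n".toList fuel l cur acc
      = acc.reverse ++ (splitNl l).modifyHead (cur.reverse ++ ·) := by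
  induction fuel with
  | zero =>
    intro l cur acc h
    have hl : l = [] := by
      cases l with
      | nil => rfl
      | cons a as => simp at h
    subst hl
    simp [PySem.Chars.splitOn.go, splitNl]
  | succ fuel ih =>
    intro l cur acc h
    cases l with
    | nil => simp [PySem.Chars.splitOn.go, splitNl]
    | cons c rest =>
      have hnl : "\n".toList = ['\n'] := rfl
      rw [PySem.Chars.splitOn.go]
      by_cases hc : c = '\n'
      · subst hc
        have hpre : "\n".toList.isPrefixOf ('\n' :: rest) = true := by
          simp [hnl, List.isPrefixOf]
        rw [if_pos hpre]
        have hd : List.drop "\n".toList.length ('\n' :: rest) = rest := by simp [hnl]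
        rw [hd, ih rest [] _ (by simpa using Nat.le_of_succ_le_succ h)]
        simp [splitNl, modifyHead_id]
      · rw [if_neg (by simp [hnl, List.isPrefixOf]; exact fun hh => hc hh.symm)]
        rw [ih rest (c :: cur) acc (by simpa using Nat.le_of_succ_le_succ h)]
        obtain ⟨hh, tt, hsp⟩ := List.exists_cons_of_ne_nil (splitNl_ne_nil rest)
        simp [splitNl, hc, hsp]

lemma splitOn_newline (l : List Char) :
    PySem.Chars.splitOn l "\n".toList = splitNl l := by
  rw [PySem.Chars.splitOn, splitOn_go_eq (l.length + 1) l [] [] (by omega)]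
  simp [modifyHead_id]

lemma join_cons (sep x : List Char) (ls : List (List Char)) (h : ls ≠ []) :
    PySem.Chars.join sep (x :: ls) = x ++ sep ++ PySem.Chars.join sep ls := by
  obtain ⟨a, as, rfl⟩ := List.exists_cons_of_ne_nil h
  exact PySem.Chars.join_cons_cons sep x a as

lemma join_splitNl (l : List Char) :
    PySem.Chars.join "\n".toList (splitNl l) = l := by
  induction l with
  | nil => simp [splitNl, PySem.Chars.join_singleton]
  | cons c rest ih =>
    by_cases hc : c = '\n'
    · subst hc
      rw [show splitNl ('\n' :: rest) = [] :: splitNl rest by simp [splitNl]]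
      rw [join_cons _ _ _ (splitNl_ne_nil rest), ih]
      rfl
    · obtain ⟨h, t, hsp⟩ := List.exists_cons_of_ne_nil (splitNl_ne_nil rest)
      rw [show splitNl (c :: rest) = (c :: h) :: t by simp [splitNl, hc, hsp]]
      cases t with
      | nil =>
        rw [PySem.Chars.join_singleton]
        rw [hsp, PySem.Chars.join_singleton] at ih
        simp [ih]
      | cons q qs =>
        rw [PySem.Chars.join_cons_cons]
        rw [hsp, PySem.Chars.join_cons_cons] at ih
        simp [← ih]

-- an occurrence of sub, which does not contain c, in xs ++ c :: ys lies in xs or in ys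
lemma infix_append_cons {sub xs ys : List Char} {c : Char}
    (hc : c ∉ sub) (h : sub <:+: xs ++ c :: ys) : sub <:+: xs ∨ sub <:+: ys := by
  obtain ⟨t₁, t₂, he⟩ := h
  have hpre : sub <+: (xs ++ c :: ys).drop t₁.length := by
    refine ⟨t₂, ?_⟩
    rw [← he, List.append_assoc, List.drop_left]
  have hlen : sub.length ≤ ((xs ++ c :: ys).drop t₁.length).length := hpre.length_le
  simp at hlen
  by_cases h1 : t₁.length + sub.length ≤ xs.length
  · left
    rw [List.drop_append_of_le_length (by omega)] at hpre
    obtain ⟨u, hu⟩ := hpre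
    have h3 : sub.length ≤ (xs.drop t₁.length).length := by simp; omega
    have e1 : sub = (xs.drop t₁.length).take sub.length := by
      calc sub = (sub ++ u).take sub.length := by
                  rw [List.take_append_of_le_length (le_refl _), List.take_length]
      _ = ((xs.drop t₁.length) ++ c :: ys).take sub.length := by rw [hu]
      _ = (xs.drop t₁.length).take sub.length := List.take_append_of_le_length h3
    have hsub : sub <+: xs.drop t₁.length := by
      rw [e1]; exact List.take_prefix _ _
    exact hsub.isInfix.trans (List.drop_suffix _ _).isInfix
  · by_cases h2 : xs.length < t₁.length
    · right
      obtain ⟨k, hk⟩ : ∃ k, t₁.length = xs.length + (k + 1) := ⟨t₁.length - xs.length - 1, by omega⟩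
      rw [hk, List.drop_append] at hpre
      have e : List.drop (xs.length + (k + 1)) xs
          ++ List.drop (xs.length + (k + 1) - xs.length) (c :: ys) = List.drop k ys := by
        rw [List.drop_eq_nil_of_le (by omega), List.nil_append]
        have e2 : xs.length + (k + 1) - xs.length = k + 1 := by omega
        rw [e2, List.drop_succ_cons]
      rw [e] at hpre
      exact hpre.isInfix.trans (List.drop_suffix _ _).isInfix
    · exfalso
      have hi : xs.length - t₁.length < sub.length := by omega
      have hget := hpre.getElem hi
      rw [List.getElem_drop] at hget
      have hidx : t₁.length + (xs.length - t₁.length) = xs.length := by omega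
      have hmem : sub[xs.length - t₁.length] ∈ sub := List.getElem_mem hi
      have hq2 : (xs ++ c :: ys)[t₁.length + (xs.length - t₁.length)]?
          = some (sub[xs.length - t₁.length]) := by
        rw [List.getElem?_eq_getElem (by simp; omega)]
        exact congrArg some hget.symm
      rw [hidx] at hq2
      have hq : (xs ++ c :: ys)[xs.length]? = some c := by simp
      rw [hq] at hq2
      injection hq2 with h6
      apply hc
      rw [h6]
      exact hmem

-- dropWhile facts
lemma dropWhile_cons_head {p : Char → Bool} : ∀ {s tail : List Char} {a : Char},
    s.dropWhile p = a :: tail → p a = false := by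
  intro s
  induction s with
  | nil => intro tail a h; simp at h
  | cons x r ih =>
    intro tail a h
    by_cases hx : p x
    · rw [List.dropWhile_cons_of_pos hx] at h
      exact ih h
    · rw [List.dropWhile_cons_of_neg hx] at h
      cases h
      simpa using hx

lemma takeWhile_append_cons {s tail : List Char} {a : Char}
    (h : s.dropWhile pvNl = a :: tail) : s = s.takeWhile pvNl ++ '\n' :: tail := by
  have ha : pvNl a = false := dropWhile_cons_head h
  have ha' : a = '\n' := by simpa [pvNl] using ha
  conv_lhs => rw [← List.takeWhile_append_dropWhile (p := pvNl) (l := s)]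
  rw [h, ha']

-- splitNl through the first-newline decomposition
lemma splitNl_nodrop {s : List Char} (h : s.dropWhile pvNl = []) : splitNl s = [s] := by
  induction s with
  | nil => simp [splitNl]
  | cons a r ih =>
    have ha : pvNl a = true := by
      by_cases hx : pvNl a
      · exact hx
      · rw [List.dropWhile_cons_of_neg hx] at h; simp at h
    have ha' : ¬ a = '\n' := by simpa [pvNl] using ha
    rw [List.dropWhile_cons_of_pos ha] at h
    rw [show splitNl (a :: r) = match splitNl r with
        | h :: t => (a :: h) :: t | [] => [[a]] by simp [splitNl, ha']]
    rw [ih h]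

lemma splitNl_decomp : ∀ {s tail : List Char} {c : Char},
    s.dropWhile pvNl = c :: tail →
    splitNl s = s.takeWhile pvNl :: splitNl tail := by
  intro s
  induction s with
  | nil => intro tail c h; simp at h
  | cons a r ih =>
    intro tail c h
    by_cases ha : pvNl a
    · have ha' : ¬ a = '\n' := by simpa [pvNl] using ha
      rw [List.dropWhile_cons_of_pos ha] at h
      rw [List.takeWhile_cons_of_pos ha]
      obtain ⟨hh, tt, hsp⟩ := List.exists_cons_of_ne_nil (splitNl_ne_nil r)
      rw [show splitNl (a :: r) = match splitNl r with
          | h :: t => (a :: h) :: t | [] => [[a]] by simp [splitNl, ha']]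
      rw [ih h]
    · have ha' : a = '\n' := by
        have : pvNl a = false := by simpa using ha
        simpa [pvNl] using this
      rw [List.dropWhile_cons_of_neg ha] at h
      cases h
      rw [List.takeWhile_cons_of_neg ha]
      subst ha'
      simp [splitNl]

-- join absorbs a separator between the last two parts
lemma join_merge (sep a b : List Char) : ∀ (ps : List (List Char)),
    PySem.Chars.join sep (ps ++ [a, b]) = PySem.Chars.join sep (ps ++ [a ++ sep ++ b]) := by
  intro ps
  induction ps with
  | nil =>
    simp only [List.nil_append]
    rw [PySem.Chars.join_cons_cons, PySem.Chars.join_singleton, PySem.Chars.join_singleton]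
  | cons p ps ih =>
    simp only [List.cons_append]
    rw [join_cons _ _ _ (by simp), join_cons _ _ _ (by simp), ih]

lemma pvALoop_ne_nil (nq : List Char) {l : List (List Char)} (h : l ≠ []) :
    pvALoop nq l ≠ [] := by
  obtain ⟨a, as, rfl⟩ := List.exists_cons_of_ne_nil h
  simp only [pvALoop]
  split <;> simp

-- the recursive closed form of B's loop
def recEdit (nq : List Char) (s : List Char) : List Char :=
  match h : s.dropWhile pvNl with
  | [] => pvEdit nq s
  | _ :: tail =>
    let head := s.takeWhile pvNl
    if PySem.Chars.isIn "Queries Tried:".toList head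
    then pvEdit nq head ++ '\n' :: tail
    else head ++ '\n' :: recEdit nq tail
termination_by s.length
decreasing_by
  have := List.length_dropWhile_le pvNl s
  rw [h] at this
  simp at this ⊢
  omega

lemma tail_len_lt {s tail : List Char} {c : Char} (h : s.dropWhile pvNl = c :: tail) :
    tail.length < s.length := by
  have := List.length_dropWhile_le pvNl s
  rw [h] at this
  simp at this
  omega

-- B's accumulator loop equals join of the accumulator and the recursive closed form
lemma pvBGo_eq (nq : List Char) : ∀ (n : Nat) (s : List Char), s.length ≤ n →
    ∀ (parts : List (List Char)),
    pvBGo nq parts s = PySem.Chars.join "\n".toList (parts ++ [recEdit nq s]) := by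
  intro n
  induction n with
  | zero =>
    intro s hs parts
    have : s = [] := by cases s with
      | nil => rfl
      | cons a r => simp at hs
    subst this
    rw [pvBGo, recEdit]
    rfl
  | succ n ih =>
    intro s hs parts
    rw [pvBGo, recEdit]
    cases hd : s.dropWhile pvNl with
    | nil => rfl
    | cons c tail =>
      simp only
      by_cases hin : PySem.Chars.isIn "Queries Tried:".toList (s.takeWhile pvNl) = true
      · rw [if_pos hin, if_pos hin]
      · rw [if_neg hin, if_neg hin]
        have htail : tail.length ≤ n := by
          have := tail_len_lt hd; omega
        rw [ih tail htail (parts ++ [s.takeWhile pvNl])]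
        rw [List.append_assoc]
        have := join_merge "\n".toList (s.takeWhile pvNl) (recEdit nq tail) parts
        simpa using this

-- A's split/loop/join equals the recursive closed form, whenever the marker occurs in s
lemma main_eq (nq : List Char) : ∀ (n : Nat) (s : List Char), s.length ≤ n →
    PySem.Chars.isIn "Queries Tried:".toList s = true →
    PySem.Chars.join "\n".toList (pvALoop nq (splitNl s)) = recEdit nq s := by
  intro n
  induction n with
  | zero =>
    intro s hs hin
    have : s = [] := by cases s with
      | nil => rfl
      | cons a r => simp at hs
    subst this
    rw [recEdit]
    rw [show splitNl [] = [[]] from rfl]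
    simp only [pvALoop]
    rw [if_pos hin, PySem.Chars.join_singleton]
    rfl
  | succ n ih =>
    intro s hs hin
    rw [recEdit]
    cases hd : s.dropWhile pvNl with
    | nil =>
      simp only
      rw [splitNl_nodrop hd]
      simp only [pvALoop]
      rw [if_pos hin, PySem.Chars.join_singleton]
    | cons c tail =>
      simp only
      rw [splitNl_decomp hd]
      by_cases hh : PySem.Chars.isIn "Queries Tried:".toList (s.takeWhile pvNl) = true
      · rw [if_pos hh]
        simp only [pvALoop, if_pos hh]
        rw [join_cons _ _ _ (splitNl_ne_nil tail), join_splitNl]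
        simp
      · rw [if_neg hh]
        simp only [pvALoop, if_neg hh]
        have htail : PySem.Chars.isIn "Queries Tried:".toList tail = true := by
          have hs' : s = s.takeWhile pvNl ++ '\n' :: tail := takeWhile_append_cons hd
          have hinf : "Queries Tried:".toList <:+: s.takeWhile pvNl ++ '\n' :: tail := by
            rw [← hs']
            exact (PySem.Chars.isIn_iff_infix _ _).mp hin
          have hnl : '\n' ∉ "Queries Tried:".toList := by decide
          rcases infix_append_cons hnl hinf with hcase | hcase
          · exact absurd ((PySem.Chars.isIn_iff_infix _ _).mpr hcase) hh
          · exact (PySem.Chars.isIn_iff_infix _ _).mpr hcase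
        have hlen : tail.length ≤ n := by
          have := tail_len_lt hd; omega
        rw [join_cons _ _ _ (pvALoop_ne_nil nq (splitNl_ne_nil tail))]
        rw [ih tail hlen htail]
        simp

-- ===== VERDICT (by name: the statement is the Claim_ definition above) =====
theorem append_queries_to_state_py_spec : Claim_equal_append_queries_to_state_py := by
  intro state new_queries _
  unfold Spec_append_queries_to_state_py append_queries_to_state_py append_queries_to_state_py_alt
  cases hb : PySem.Chars.isIn "Queries Tried:".toList state.toList with
  | false => simp only [Bool.false_eq_true, if_false]
  | true =>
    simp only [if_true]
    congr 1
    rw [splitOn_newline,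
        main_eq new_queries.toList state.toList.length state.toList (le_refl _) hb,
        pvBGo_eq new_queries.toList state.toList.length state.toList (le_refl _) []]
    simp [PySem.Chars.join_singleton]
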